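-- pv_equiv track=rewrite | github.com/isehgu/ansible | ansible_app/roles/core/filter_plugins/gts.py | gtsOpconCutFluff
-- ===== SOURCE A (Python) =====
-- def gtsOpconCutFluff(output_list):
--     """ Cut out everything above ======= including ======== from opcon output """
--     result_list = []
--     separator = 0
--
--     for line in output_list:
--         if '========' in line:
--             separator = 1
--             continue
--
--         if 'Last login' in line:
--             continue
--
--         if separator:
--             result_list.append(line)
--
--     return result_list
-- ===== SOURCE B (Python) =====
-- def gtsOpconCutFluff(output_list):
--     """ Cut out everything above ======= including ======== from opcon output """
--     for i, line in enumerate(output_list):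
--         if '========' in line:
--             return [l for l in output_list[i + 1:]
--                     if '========' not in l and 'Last login' not in l]
--     return []
-- ===== Notes on version B (the rewrite author's own statement) =====
-- stated objective: simpler
-- what changed: B locates the first separator line by index and returns a single filter over the slice after it (empty list if no separator), instead of threading a 0/1 flag through one loop.
import Mathlib
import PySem

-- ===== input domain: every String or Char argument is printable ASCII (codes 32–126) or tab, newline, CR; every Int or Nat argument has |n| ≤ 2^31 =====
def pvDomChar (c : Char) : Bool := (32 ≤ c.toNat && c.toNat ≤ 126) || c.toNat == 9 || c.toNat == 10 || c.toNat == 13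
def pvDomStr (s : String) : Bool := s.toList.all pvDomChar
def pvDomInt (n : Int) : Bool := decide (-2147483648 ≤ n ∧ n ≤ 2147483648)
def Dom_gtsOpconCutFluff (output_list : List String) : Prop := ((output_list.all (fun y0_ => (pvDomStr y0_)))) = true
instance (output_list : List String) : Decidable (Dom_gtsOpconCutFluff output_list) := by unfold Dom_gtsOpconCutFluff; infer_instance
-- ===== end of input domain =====

-- B finds the first separator line up front and filters the suffix after it, replacing A's flag-threading loop (simpler decomposition, same O(n) cost).


-- ===== PORT A =====
-- flag-threading loop: separator is Python's int flag; appends only when it is set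
def gtsStep (st : List String × Int) (line : String) : List String × Int :=
  if PySem.Str.isIn "========" line then (st.1, 1)
  else if PySem.Str.isIn "Last login" line then st
  else if st.2 ≠ 0 then (st.1 ++ [line], st.2) else st

def gtsOpconCutFluff (output_list : List String) : List String :=
  (output_list.foldl gtsStep ([], 0)).1

-- ===== PORT B =====
-- B: find the suffix after the first separator line (none if absent), then one filter over it
def gtsRestAfterSep : List String → Option (List String)
  | [] => none
  | line :: rest =>
      if PySem.Str.isIn "========" line then some rest else gtsRestAfterSep rest

def gtsKeep (l : String) : Bool :=
  !PySem.Str.isIn "========" l && !PySem.Str.isIn "Last login" l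

def gtsOpconCutFluff_alt (output_list : List String) : List String :=
  match gtsRestAfterSep output_list with
  | none => []
  | some rest => rest.filter gtsKeep

-- ===== PRECONDITION & SPEC =====
def Spec_gtsOpconCutFluff (output_list : List String) (out : List String) : Prop := out = gtsOpconCutFluff_alt output_list
instance (output_list : List String) (out : List String) : Decidable (Spec_gtsOpconCutFluff output_list out) := by unfold Spec_gtsOpconCutFluff; infer_instance

-- ===== CLAIM (what is proved, stated in full; the proofs are below) =====
def Claim_equal_gtsOpconCutFluff : Prop := ∀ (output_list : List String), Dom_gtsOpconCutFluff output_list → Spec_gtsOpconCutFluff output_list (gtsOpconCutFluff output_list)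

-- ===== LEMMAS AND PROOFS =====

-- ===== VERDICT (by name: the statement is the Claim_ definition above) =====
lemma gts_foldl_one : ∀ (ls : List String) (acc : List String),
    (ls.foldl gtsStep (acc, 1)).1 = acc ++ ls.filter gtsKeep := by
  intro ls
  induction ls with
  | nil => intro acc; simp
  | cons l ls ih =>
      intro acc
      simp only [List.foldl_cons, gtsStep]
      split_ifs with h1 h2 <;> simp_all [gtsKeep]

lemma gts_foldl_zero : ∀ (ls : List String),
    (ls.foldl gtsStep ([], 0)).1 = gtsOpconCutFluff_alt ls := by
  intro ls
  induction ls with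
  | nil => simp [gtsOpconCutFluff_alt, gtsRestAfterSep]
  | cons l ls ih =>
      simp only [List.foldl_cons, gtsStep, gtsOpconCutFluff_alt, gtsRestAfterSep]
      split_ifs with h1 h2 h3
      · simp [gts_foldl_one]
      · simpa [gtsOpconCutFluff_alt] using ih
      · exact absurd rfl h3
      · simpa [gtsOpconCutFluff_alt] using ih

theorem gtsOpconCutFluff_spec : Claim_equal_gtsOpconCutFluff := by
  intro output_list _
  unfold Spec_gtsOpconCutFluff gtsOpconCutFluff
  exact gts_foldl_zero output_list
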